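-- pv_equiv track=rewrite | github.com/BrianMuhic/SideQuest | webapp/core/service/emailer.py | _clean_emails
-- ===== SOURCE A (Python) =====
-- from typing import Sequence
--
-- def _clean_emails(emails: Sequence[str] | str | None) -> list[str]:
--     """Takes in email(s) and strips out invalid addresses."""
--     if not emails:
--         return []
--
--     if isinstance(emails, str):
--         emails = emails.split(",")
--
--     cleaned_emails = []
--     for email in emails:
--         parts = [part.strip() for part in email.split(",")]
--         cleaned_emails.extend(part for part in parts if part)
--
--     return cleaned_emails
-- ===== SOURCE B (Python) =====
-- def _clean_emails(emails):
--     """Takes in email(s) and strips out invalid addresses."""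
--     if not emails:
--         return []
--     if isinstance(emails, str):
--         emails = [emails]
--     out = []
--     for email in emails:
--         buf = []
--         for ch in email:
--             if ch == ',':
--                 tok = ''.join(buf).strip()
--                 if tok:
--                     out.append(tok)
--                 buf = []
--             else:
--                 buf.append(ch)
--         tok = ''.join(buf).strip()
--         if tok:
--             out.append(tok)
--     return out
-- ===== Notes on version B (the rewrite author's own statement) =====
-- stated objective: alternative
-- what changed: B replaces A's split/strip/filter pipeline with a single character-level scanner that accumulates a buffer and flushes the stripped token on each comma and at end of each entry.
import Mathlib
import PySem

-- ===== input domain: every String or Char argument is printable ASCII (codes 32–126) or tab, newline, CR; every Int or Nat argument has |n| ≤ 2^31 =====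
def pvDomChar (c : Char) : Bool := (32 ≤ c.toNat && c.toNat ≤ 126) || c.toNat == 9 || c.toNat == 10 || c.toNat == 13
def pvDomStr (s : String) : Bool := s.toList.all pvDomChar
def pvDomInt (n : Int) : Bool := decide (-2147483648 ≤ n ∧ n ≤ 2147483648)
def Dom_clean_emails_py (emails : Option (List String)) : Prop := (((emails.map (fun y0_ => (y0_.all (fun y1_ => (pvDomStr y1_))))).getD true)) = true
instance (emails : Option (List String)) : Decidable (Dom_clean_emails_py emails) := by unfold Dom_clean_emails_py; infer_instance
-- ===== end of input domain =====

-- B replaces A's split/strip/filter pipeline by a single character-level scanner that flushes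
-- a buffer on each ',' and at end of entry (alternative decomposition, same cost).


-- ===== PORT A =====
-- A: guard on falsy input, then for each entry split on ",", strip each part, extend the
-- accumulator with the non-empty parts.  (The `isinstance(str)` branch is outside the
-- Option (List String) type and does not appear.)
def clean_emails_py (emails : Option (List String)) : List String :=
  match emails with
  | none => []
  | some es =>
      if es.isEmpty then []
      else
        es.foldl (fun cleaned email =>
          let parts := ((PySem.Str.split? email ",").getD []).map PySem.Str.strip
          cleaned ++ parts.filter (fun p => p ≠ "")) []

-- ===== PORT B =====
-- B: a streaming scanner.  flushScan strips the buffer and appends it to the output if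
-- non-empty; scanEmail walks the characters of one entry, flushing on ',' and at the end.
def flushScan (buf : List Char) (out : List String) : List String :=
  let tok := PySem.Str.strip (String.ofList buf)
  if tok = "" then out else out ++ [tok]

def scanEmail : List Char → List Char → List String → List String
  | [], buf, out => flushScan buf out
  | c :: cs, buf, out =>
      if c = ',' then scanEmail cs [] (flushScan buf out)
      else scanEmail cs (buf ++ [c]) out

def clean_emails_py_alt (emails : Option (List String)) : List String :=
  match emails with
  | none => []
  | some es =>
      if es.isEmpty then []
      else es.foldl (fun out email => scanEmail email.toList [] out) []

-- ===== PRECONDITION & SPEC =====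
def Spec_clean_emails_py (emails : Option (List String)) (out : List String) : Prop := out = clean_emails_py_alt emails
instance (emails : Option (List String)) (out : List String) : Decidable (Spec_clean_emails_py emails out) := by unfold Spec_clean_emails_py; infer_instance

-- ===== CLAIM (what is proved, stated in full; the proofs are below) =====
def Claim_equal_clean_emails_py : Prop := ∀ (emails : Option (List String)), Dom_clean_emails_py emails → Spec_clean_emails_py emails (clean_emails_py emails)

-- ===== LEMMAS AND PROOFS =====

-- Splitting a char list on a single character, structurally.
def scChar (c : Char) : List Char → List (List Char)
  | [] => [[]]
  | x :: xs =>
    if x = c then [] :: scChar c xs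
    else
      match scChar c xs with
      | [] => [[x]]
      | p :: ps => (x :: p) :: ps

theorem scChar_ne_nil (c : Char) (l : List Char) : scChar c l ≠ [] := by
  cases l with
  | nil => simp [scChar]
  | cons x xs =>
    simp only [scChar]
    split_ifs with h
    · simp
    · cases hs : scChar c xs <;> simp

-- prepend a prefix onto the first piece
def consH (pre : List Char) : List (List Char) → List (List Char)
  | [] => [pre]
  | p :: ps => (pre ++ p) :: ps

theorem go_eq (c : Char) (l : List Char) (fuel : Nat) (cur : List Char)
    (acc : List (List Char)) (h : l.length < fuel) :
    PySem.Chars.splitOn.go [c] fuel l cur acc = acc.reverse ++ consH cur.reverse (scChar c l) := by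
  induction l generalizing fuel cur acc with
  | nil =>
    obtain ⟨f, rfl⟩ : ∃ f, fuel = f + 1 := ⟨fuel - 1, by omega⟩
    rw [PySem.Chars.splitOn.go]
    simp only [scChar, consH]
    rw [List.reverse_cons, List.append_nil]
    exact fun hc => Nat.succ_ne_zero f hc
  | cons x rest ih =>
    obtain ⟨f, rfl⟩ : ∃ f, fuel = f + 1 := ⟨fuel - 1, by omega⟩
    rw [PySem.Chars.splitOn.go]
    simp only [List.isPrefixOf, List.length_cons, List.length_nil] at *
    by_cases hx : c = x
    · subst hx
      simp only [beq_self_eq_true, Bool.true_and, if_pos, List.drop_succ_cons, List.drop_zero]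
      rw [ih f [] (cur.reverse :: acc) (by omega)]
      rcases hs : scChar c rest with _ | ⟨p, ps⟩
      · exact absurd hs (scChar_ne_nil c rest)
      · simp [scChar, hs, consH]
    · have hb : (c == x && true) = false := by simp [hx]
      simp only [hb, Bool.false_eq_true, if_false]
      rw [ih f (x :: cur) acc (by omega)]
      have hx' : ¬ x = c := fun hh => hx hh.symm
      rcases hs : scChar c rest with _ | ⟨p, ps⟩
      · exact absurd hs (scChar_ne_nil c rest)
      · simp [scChar, hx', hs, consH]

theorem splitOn_single (c : Char) (l : List Char) :
    PySem.Chars.splitOn l [c] = scChar c l := by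
  unfold PySem.Chars.splitOn
  rw [go_eq c l (l.length + 1) [] [] (by omega)]
  rcases hs : scChar c l with _ | ⟨p, ps⟩
  · exact absurd hs (scChar_ne_nil c l)
  · simp [consH]

-- the canonical result of cleaning one entry
def canonEntry (e : List Char) : List String :=
  ((scChar ',' e).map (fun p => PySem.Str.strip (String.ofList p))).filter (fun p => p ≠ "")

-- A's per-entry step computes canonEntry
theorem a_step (e : String) :
    (((PySem.Str.split? e ",").getD []).map PySem.Str.strip).filter (fun p => p ≠ "") =
      canonEntry e.toList := by
  simp only [PySem.Str.split?, PySem.Chars.split?, canonEntry]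
  have hsep : (",".toList) = [','] := rfl
  simp only [hsep, List.isEmpty_cons, Bool.false_eq_true, if_false, Option.map_some,
    Option.getD_some, splitOn_single, List.map_map]
  rfl

-- B's scanner computes canonEntry of the remaining input with the buffer prepended
theorem scan_eq (l buf : List Char) (out : List String) :
    scanEmail l buf out =
      out ++ ((consH buf (scChar ',' l)).map (fun p => PySem.Str.strip (String.ofList p))).filter
        (fun p => p ≠ "") := by
  induction l generalizing buf out with
  | nil =>
    simp only [scanEmail, scChar, consH, List.append_nil, flushScan, List.map_cons,
      List.map_nil, List.filter]
    split_ifs with h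
    · simp [h]
    · simp [h]
  | cons x xs ih =>
    by_cases hx : x = ','
    · subst hx
      have h1 : scanEmail (',' :: xs) buf out = scanEmail xs [] (flushScan buf out) := by
        simp [scanEmail]
      rw [h1, ih]
      rcases hs : scChar ',' xs with _ | ⟨p, ps⟩
      · exact absurd hs (scChar_ne_nil ',' xs)
      · by_cases hb : PySem.Str.strip (String.ofList buf) = ""
        · simp [scChar, hs, consH, flushScan, hb]
        · simp [scChar, hs, consH, flushScan, hb]
    · simp only [scanEmail, if_neg hx]
      rw [ih]
      simp only [scChar, if_neg hx]
      rcases hs : scChar ',' xs with _ | ⟨p, ps⟩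
      · exact absurd hs (scChar_ne_nil ',' xs)
      · simp [consH, List.append_assoc]

theorem scan_entry (e : String) (out : List String) :
    scanEmail e.toList [] out = out ++ canonEntry e.toList := by
  rw [scan_eq]
  rcases hs : scChar ',' e.toList with _ | ⟨p, ps⟩
  · exact absurd hs (scChar_ne_nil ',' e.toList)
  · simp [consH, canonEntry, hs]

theorem fold_eq (es : List String) (acc : List String) :
    es.foldl (fun cleaned email =>
        let parts := ((PySem.Str.split? email ",").getD []).map PySem.Str.strip
        cleaned ++ parts.filter (fun p => p ≠ "")) acc =
      es.foldl (fun out email => scanEmail email.toList [] out) acc := by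
  induction es generalizing acc with
  | nil => rfl
  | cons e es ih =>
    simp only [List.foldl_cons]
    rw [scan_entry, a_step, ih]

-- ===== VERDICT (by name: the statement is the Claim_ definition above) =====
theorem clean_emails_py_spec : Claim_equal_clean_emails_py := by
  intro emails _
  unfold Spec_clean_emails_py clean_emails_py clean_emails_py_alt
  match emails with
  | none => rfl
  | some es =>
    by_cases he : es.isEmpty
    · simp [he]
    · simp only [he, Bool.false_eq_true, if_false]
      exact fold_eq es []
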